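-- pv_equiv track=rewrite | github.com/Roderick111/hp-game | backend/src/api/routes/investigation.py | _build_evidence_names
-- ===== SOURCE A (Python) =====
-- from typing import Any
--
-- def _build_evidence_names(
--     evidence_ids: list[str],
--     hidden_evidence: list[dict[str, Any]],
-- ) -> dict[str, str]:
--     """Map evidence IDs to display names from case data."""
--     if not evidence_ids:
--         return {}
--     name_map = {e.get("id", ""): e.get("name", "") for e in hidden_evidence}
--     return {eid: name_map.get(eid, eid) for eid in evidence_ids}
-- ===== SOURCE B (Python) =====
-- from typing import Any
--
-- def _build_evidence_names(
--     evidence_ids: list[str],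
--     hidden_evidence: list[dict[str, Any]],
-- ) -> dict[str, str]:
--     """Map evidence IDs to display names from case data."""
--     result: dict[str, str] = {}
--     for eid in evidence_ids:
--         name = eid
--         for e in hidden_evidence:
--             if e.get("id", "") == eid:
--                 name = e.get("name", "")
--         result[eid] = name
--     return result
-- ===== Notes on version B (the rewrite author's own statement) =====
-- stated objective: alternative
-- what changed: Dropped the intermediate name_map dict (and the redundant empty-list early return); the result is built in one loop over evidence_ids, each eid resolved by a direct linear scan of hidden_evidence keeping the last matching name.
import Mathlib
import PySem

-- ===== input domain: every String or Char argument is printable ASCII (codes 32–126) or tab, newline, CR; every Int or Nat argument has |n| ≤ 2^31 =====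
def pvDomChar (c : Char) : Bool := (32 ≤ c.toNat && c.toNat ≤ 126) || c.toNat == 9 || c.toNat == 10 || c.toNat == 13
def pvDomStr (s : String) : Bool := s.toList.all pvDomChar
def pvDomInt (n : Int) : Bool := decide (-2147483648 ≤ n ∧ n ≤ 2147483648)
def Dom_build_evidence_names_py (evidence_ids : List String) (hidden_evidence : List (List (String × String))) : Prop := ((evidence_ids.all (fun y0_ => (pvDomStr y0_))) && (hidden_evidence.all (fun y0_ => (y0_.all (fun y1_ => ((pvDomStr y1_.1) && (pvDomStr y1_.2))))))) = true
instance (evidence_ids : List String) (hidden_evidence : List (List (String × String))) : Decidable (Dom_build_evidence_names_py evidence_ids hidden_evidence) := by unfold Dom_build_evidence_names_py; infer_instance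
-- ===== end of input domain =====

-- B drops the intermediate name_map dict and resolves each eid by a direct last-match scan of hidden_evidence (objective: alternative decomposition, not faster).

-- e.get(k, dflt) on a Python dict value (assoc list, first-match lookup)
def pyGet (e : List (String × String)) (k dflt : String) : String :=
  match e.find? (fun p => p.1 == k) with
  | some p => p.2
  | none => dflt

-- ===== PORT A =====
def build_evidence_names_py (evidence_ids : List String) (hidden_evidence : List (List (String × String))) : List (String × String) :=
  if evidence_ids = [] then []
  else
    -- name_map = {e.get("id",""): e.get("name","") for e in hidden_evidence}
    let name_map : PySem.Dict String String :=
      hidden_evidence.foldl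
        (fun d e => d.insert (pyGet e "id" "") (pyGet e "name" "")) PySem.Dict.empty
    -- {eid: name_map.get(eid, eid) for eid in evidence_ids}
    (evidence_ids.foldl (fun r eid => r.insert eid (name_map.getD eid eid)) PySem.Dict.empty).items

-- ===== PORT B =====
def build_evidence_names_py_alt (evidence_ids : List String) (hidden_evidence : List (List (String × String))) : List (String × String) :=
  (evidence_ids.foldl
    (fun r eid =>
      r.insert eid
        (hidden_evidence.foldl
          (fun name e => if pyGet e "id" "" == eid then pyGet e "name" "" else name) eid))
    PySem.Dict.empty).items

-- ===== PRECONDITION & SPEC =====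
def Spec_build_evidence_names_py (evidence_ids : List String) (hidden_evidence : List (List (String × String))) (out : List (String × String)) : Prop := out = build_evidence_names_py_alt evidence_ids hidden_evidence
instance (evidence_ids : List String) (hidden_evidence : List (List (String × String))) (out : List (String × String)) : Decidable (Spec_build_evidence_names_py evidence_ids hidden_evidence out) := by unfold Spec_build_evidence_names_py; infer_instance

-- ===== CLAIM (what is proved, stated in full; the proofs are below) =====
def Claim_equal_build_evidence_names_py : Prop := ∀ (evidence_ids : List String) (hidden_evidence : List (List (String × String))), Dom_build_evidence_names_py evidence_ids hidden_evidence → Spec_build_evidence_names_py evidence_ids hidden_evidence (build_evidence_names_py evidence_ids hidden_evidence)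

-- ===== LEMMAS AND PROOFS =====

-- last-wins insert loop ≙ last-match scan: looking up eid in the dict built by inserting
-- (id, name) for every e equals folding a "keep the name of the last e whose id matches" scan.
theorem getD_foldl_insert_eq_scan (hs : List (List (String × String))) (d : PySem.Dict String String)
    (eid dflt : String) :
    (hs.foldl (fun d e => d.insert (pyGet e "id" "") (pyGet e "name" "")) d).getD eid dflt
      = hs.foldl (fun name e => if pyGet e "id" "" == eid then pyGet e "name" "" else name)
          (d.getD eid dflt) := by
  induction hs generalizing d with
  | nil => rfl
  | cons e hs ih =>
    simp only [List.foldl_cons]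
    rw [ih]
    congr 1
    rw [PySem.Dict.getD_insert]
    by_cases h : pyGet e "id" "" == eid
    · simp [eq_of_beq h]
    · have : ¬ eid = pyGet e "id" "" := fun he => by simp [he] at h
      simp [this, h]

theorem build_evidence_names_eq (evidence_ids : List String) (hidden_evidence : List (List (String × String))) :
    build_evidence_names_py evidence_ids hidden_evidence
      = build_evidence_names_py_alt evidence_ids hidden_evidence := by
  unfold build_evidence_names_py build_evidence_names_py_alt
  by_cases h : evidence_ids = []
  · simp [h, PySem.Dict.empty]
  · simp only [if_neg h]
    congr 1
    apply PySem.List.foldl_congr_mem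
    intro r eid _
    rw [getD_foldl_insert_eq_scan hidden_evidence PySem.Dict.empty eid eid]
    rfl

-- ===== VERDICT (by name: the statement is the Claim_ definition above) =====
theorem build_evidence_names_py_spec : Claim_equal_build_evidence_names_py := by
  intro ids hs _
  exact build_evidence_names_eq ids hs
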